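-- pv_equiv track=rewrite | github.com/Aashutosh2906/stevensgrp | dvnc_connectome_v3/stevens_upgrade (1)/src/dvnc_connectome/curation/stevens_loader.py | _classify_domain_from_fields
-- ===== SOURCE A (Python) =====
-- def _classify_domain_from_fields(fields: list[str] | None) -> str:
--     if not fields:
--         return "general"
--     fields_lower = [f.lower() for f in fields]
--     if any("raman" in f or "spectro" in f or "optic" in f for f in fields_lower):
--         return "raman_spectroscopy"
--     if any("cardiac" in f or "heart" in f or "myocard" in f for f in fields_lower):
--         return "cardiac_biomaterials"
--     if any("polymer" in f or "conduct" in f or "electroact" in f for f in fields_lower):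
--         return "conducting_polymers"
--     if any("bone" in f or "mineral" in f or "scaffold" in f for f in fields_lower):
--         return "biomineralization"
--     if any("material" in f or "nano" in f for f in fields_lower):
--         return "materials"
--     if any("bio" in f or "cell" in f or "tissue" in f for f in fields_lower):
--         return "biomechanics"
--     return "general"
-- ===== SOURCE B (Python) =====
-- _CATEGORIES = [
--     ("raman_spectroscopy", ("raman", "spectro", "optic")),
--     ("cardiac_biomaterials", ("cardiac", "heart", "myocard")),
--     ("conducting_polymers", ("polymer", "conduct", "electroact")),
--     ("biomineralization", ("bone", "mineral", "scaffold")),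
--     ("materials", ("material", "nano")),
--     ("biomechanics", ("bio", "cell", "tissue")),
-- ]
--
--
-- def _field_rank(field):
--     """Index of the first category this single field matches, len(_CATEGORIES) if none."""
--     fl = field.lower()
--     for i, (_, keywords) in enumerate(_CATEGORIES):
--         if any(k in fl for k in keywords):
--             return i
--     return len(_CATEGORIES)
--
--
-- def _classify_domain_from_fields(fields):
--     if not fields:
--         return "general"
--     r = min(_field_rank(f) for f in fields)
--     return _CATEGORIES[r][0] if r < len(_CATEGORIES) else "general"
-- ===== Notes on version B (the rewrite author's own statement) =====
-- stated objective: alternative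
-- what changed: Swaps the loop nesting: instead of A's category-outer scan (each category tested against every field), B computes a per-field rank (index of the first category the field matches, 6 if none) in one pass over the fields, reduces with min, and maps the minimum rank back to its label.
import Mathlib
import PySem

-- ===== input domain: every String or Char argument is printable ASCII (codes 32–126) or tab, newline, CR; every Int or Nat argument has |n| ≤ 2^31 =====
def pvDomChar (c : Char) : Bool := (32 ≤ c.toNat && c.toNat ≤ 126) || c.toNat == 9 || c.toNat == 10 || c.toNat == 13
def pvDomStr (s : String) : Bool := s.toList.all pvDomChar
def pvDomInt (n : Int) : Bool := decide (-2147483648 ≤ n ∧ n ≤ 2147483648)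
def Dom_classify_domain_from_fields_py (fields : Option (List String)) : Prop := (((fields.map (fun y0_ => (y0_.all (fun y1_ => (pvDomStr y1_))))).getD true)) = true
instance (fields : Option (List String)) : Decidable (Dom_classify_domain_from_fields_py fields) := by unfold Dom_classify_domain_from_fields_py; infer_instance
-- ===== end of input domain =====

-- B swaps the loop nesting: instead of A's category-outer scan it computes a per-field rank
-- (first matching category index, 6 if none) and reduces with min (objective: alternative).

-- ===== PORT A =====
def classify_domain_from_fields_py (fields : Option (List String)) : String :=
  match fields with
  | none => "general"
  | some [] => "general"
  | some fs =>
    let fields_lower := fs.map PySem.Str.lower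
    if fields_lower.any (fun f => PySem.Str.isIn "raman" f || PySem.Str.isIn "spectro" f || PySem.Str.isIn "optic" f) then "raman_spectroscopy"
    else if fields_lower.any (fun f => PySem.Str.isIn "cardiac" f || PySem.Str.isIn "heart" f || PySem.Str.isIn "myocard" f) then "cardiac_biomaterials"
    else if fields_lower.any (fun f => PySem.Str.isIn "polymer" f || PySem.Str.isIn "conduct" f || PySem.Str.isIn "electroact" f) then "conducting_polymers"
    else if fields_lower.any (fun f => PySem.Str.isIn "bone" f || PySem.Str.isIn "mineral" f || PySem.Str.isIn "scaffold" f) then "biomineralization"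
    else if fields_lower.any (fun f => PySem.Str.isIn "material" f || PySem.Str.isIn "nano" f) then "materials"
    else if fields_lower.any (fun f => PySem.Str.isIn "bio" f || PySem.Str.isIn "cell" f || PySem.Str.isIn "tissue" f) then "biomechanics"
    else "general"

-- ===== PORT B =====
def pvCategories : List (String × List String) :=
  [("raman_spectroscopy", ["raman", "spectro", "optic"]),
   ("cardiac_biomaterials", ["cardiac", "heart", "myocard"]),
   ("conducting_polymers", ["polymer", "conduct", "electroact"]),
   ("biomineralization", ["bone", "mineral", "scaffold"]),
   ("materials", ["material", "nano"]),
   ("biomechanics", ["bio", "cell", "tissue"])]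

-- the `for i, (_, keywords) in enumerate(_CATEGORIES)` loop, with i carried as an accumulator
def pvFieldRankAux (fl : String) : List (String × List String) → Nat → Nat
  | [], i => i
  | (_, keywords) :: rest, i =>
    if keywords.any (fun k => PySem.Str.isIn k fl) then i else pvFieldRankAux fl rest (i + 1)

def pvFieldRank (field : String) : Nat :=
  pvFieldRankAux (PySem.Str.lower field) pvCategories 0

def classify_domain_from_fields_py_alt (fields : Option (List String)) : String :=
  match fields with
  | none => "general"
  | some [] => "general"
  | some (f :: fs) =>
    let r := fs.foldl (fun acc x => Nat.min acc (pvFieldRank x)) (pvFieldRank f)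
    match pvCategories[r]? with
    | some c => c.1
    | none => "general"

-- ===== PRECONDITION & SPEC =====
def Spec_classify_domain_from_fields_py (fields : Option (List String)) (out : String) : Prop := out = classify_domain_from_fields_py_alt fields
instance (fields : Option (List String)) (out : String) : Decidable (Spec_classify_domain_from_fields_py fields out) := by unfold Spec_classify_domain_from_fields_py; infer_instance

-- ===== CLAIM (what is proved, stated in full; the proofs are below) =====
def Claim_equal_classify_domain_from_fields_py : Prop := ∀ (fields : Option (List String)), Dom_classify_domain_from_fields_py fields → Spec_classify_domain_from_fields_py fields (classify_domain_from_fields_py fields)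

-- ===== LEMMAS AND PROOFS =====

-- the six per-field category tests, on the already-lowered field
def pvC (g : String) : Nat → Bool
  | 0 => PySem.Str.isIn "raman" g || PySem.Str.isIn "spectro" g || PySem.Str.isIn "optic" g
  | 1 => PySem.Str.isIn "cardiac" g || PySem.Str.isIn "heart" g || PySem.Str.isIn "myocard" g
  | 2 => PySem.Str.isIn "polymer" g || PySem.Str.isIn "conduct" g || PySem.Str.isIn "electroact" g
  | 3 => PySem.Str.isIn "bone" g || PySem.Str.isIn "mineral" g || PySem.Str.isIn "scaffold" g
  | 4 => PySem.Str.isIn "material" g || PySem.Str.isIn "nano" g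
  | 5 => PySem.Str.isIn "bio" g || PySem.Str.isIn "cell" g || PySem.Str.isIn "tissue" g
  | _ => false

-- pvFieldRank as the explicit 6-way chain over pvC
lemma pvFieldRank_chain (f : String) :
    pvFieldRank f =
      (if pvC (PySem.Str.lower f) 0 then 0
       else if pvC (PySem.Str.lower f) 1 then 1
       else if pvC (PySem.Str.lower f) 2 then 2
       else if pvC (PySem.Str.lower f) 3 then 3
       else if pvC (PySem.Str.lower f) 4 then 4
       else if pvC (PySem.Str.lower f) 5 then 5
       else 6) := by
  simp [pvFieldRank, pvFieldRankAux, pvCategories, pvC, Bool.or_assoc]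

lemma pvFieldRank_le_six (f : String) : pvFieldRank f ≤ 6 := by
  rw [pvFieldRank_chain]; split_ifs <;> omega

lemma pvFieldRank_ge {f : String} {k : Nat} (hk : k ≤ 6)
    (h : ∀ j < k, pvC (PySem.Str.lower f) j = false) : k ≤ pvFieldRank f := by
  rw [pvFieldRank_chain]
  interval_cases k
  · exact Nat.zero_le _
  · rw [if_neg (by simp [h 0 (by omega)])]; split_ifs <;> omega
  · rw [if_neg (by simp [h 0 (by omega)]), if_neg (by simp [h 1 (by omega)])]
    split_ifs <;> omega
  · rw [if_neg (by simp [h 0 (by omega)]), if_neg (by simp [h 1 (by omega)]),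
        if_neg (by simp [h 2 (by omega)])]
    split_ifs <;> omega
  · rw [if_neg (by simp [h 0 (by omega)]), if_neg (by simp [h 1 (by omega)]),
        if_neg (by simp [h 2 (by omega)]), if_neg (by simp [h 3 (by omega)])]
    split_ifs <;> omega
  · rw [if_neg (by simp [h 0 (by omega)]), if_neg (by simp [h 1 (by omega)]),
        if_neg (by simp [h 2 (by omega)]), if_neg (by simp [h 3 (by omega)]),
        if_neg (by simp [h 4 (by omega)])]
    split_ifs <;> omega
  · rw [if_neg (by simp [h 0 (by omega)]), if_neg (by simp [h 1 (by omega)]),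
        if_neg (by simp [h 2 (by omega)]), if_neg (by simp [h 3 (by omega)]),
        if_neg (by simp [h 4 (by omega)]), if_neg (by simp [h 5 (by omega)])]

lemma pvFieldRank_eq {f : String} {k : Nat} (hk : k < 6)
    (h : ∀ j < k, pvC (PySem.Str.lower f) j = false)
    (hc : pvC (PySem.Str.lower f) k = true) : pvFieldRank f = k := by
  have h1 := pvFieldRank_ge (k := k) (by omega) h
  have h2 : pvFieldRank f ≤ k := by
    rw [pvFieldRank_chain]
    interval_cases k <;> simp [hc] <;> split_ifs <;> omega
  omega

lemma pv_foldl_min_eq {l : List String} {a k : Nat} (ha : k ≤ a)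
    (hall : ∀ x ∈ l, k ≤ pvFieldRank x)
    (hex : a = k ∨ ∃ x ∈ l, pvFieldRank x = k) :
    l.foldl (fun acc x => Nat.min acc (pvFieldRank x)) a = k := by
  induction l generalizing a with
  | nil =>
    cases hex with
    | inl h => exact h
    | inr h => obtain ⟨x, hx, -⟩ := h; cases hx
  | cons x xs ih =>
    have hx := hall x List.mem_cons_self
    refine ih (a := Nat.min a (pvFieldRank x)) (Nat.le_min.mpr ⟨ha, hx⟩)
      (fun y hy => hall y (List.mem_cons_of_mem _ hy)) ?_
    rcases hex with h | ⟨y, hy, hyk⟩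
    · left; subst h; exact Nat.min_eq_left hx
    · rcases List.mem_cons.mp hy with rfl | hy'
      · left; rw [hyk]; exact Nat.min_eq_right ha
      · right; exact ⟨y, hy', hyk⟩

-- ===== VERDICT (by name: the statement is the Claim_ definition above) =====
theorem classify_domain_from_fields_py_spec : Claim_equal_classify_domain_from_fields_py := by
  intro fields _
  unfold Spec_classify_domain_from_fields_py
  match fields with
  | none => rfl
  | some [] => rfl
  | some (f :: fs) =>
    show classify_domain_from_fields_py (some (f :: fs))
        = classify_domain_from_fields_py_alt (some (f :: fs))
    simp only [classify_domain_from_fields_py, classify_domain_from_fields_py_alt]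
    have e0 : (((f :: fs).map PySem.Str.lower).any (fun g => PySem.Str.isIn "raman" g || PySem.Str.isIn "spectro" g || PySem.Str.isIn "optic" g))
        = (f :: fs).any (fun x => pvC (PySem.Str.lower x) 0) := by
      rw [List.any_map]; rfl
    have e1 : (((f :: fs).map PySem.Str.lower).any (fun g => PySem.Str.isIn "cardiac" g || PySem.Str.isIn "heart" g || PySem.Str.isIn "myocard" g))
        = (f :: fs).any (fun x => pvC (PySem.Str.lower x) 1) := by
      rw [List.any_map]; rfl
    have e2 : (((f :: fs).map PySem.Str.lower).any (fun g => PySem.Str.isIn "polymer" g || PySem.Str.isIn "conduct" g || PySem.Str.isIn "electroact" g))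
        = (f :: fs).any (fun x => pvC (PySem.Str.lower x) 2) := by
      rw [List.any_map]; rfl
    have e3 : (((f :: fs).map PySem.Str.lower).any (fun g => PySem.Str.isIn "bone" g || PySem.Str.isIn "mineral" g || PySem.Str.isIn "scaffold" g))
        = (f :: fs).any (fun x => pvC (PySem.Str.lower x) 3) := by
      rw [List.any_map]; rfl
    have e4 : (((f :: fs).map PySem.Str.lower).any (fun g => PySem.Str.isIn "material" g || PySem.Str.isIn "nano" g))
        = (f :: fs).any (fun x => pvC (PySem.Str.lower x) 4) := by
      rw [List.any_map]; rfl
    have e5 : (((f :: fs).map PySem.Str.lower).any (fun g => PySem.Str.isIn "bio" g || PySem.Str.isIn "cell" g || PySem.Str.isIn "tissue" g))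
        = (f :: fs).any (fun x => pvC (PySem.Str.lower x) 5) := by
      rw [List.any_map]; rfl
    rw [e0, e1, e2, e3, e4, e5]
    have hf : ∀ j : Nat, ¬ ((f :: fs).any (fun x => pvC (PySem.Str.lower x) j) = true) →
        ∀ y ∈ f :: fs, pvC (PySem.Str.lower y) j = false := by
      intro j hj y hy
      exact Bool.eq_false_iff.mpr (List.any_eq_false.mp (Bool.eq_false_iff.mpr hj) y hy)
    have key : ∀ k : Nat, k < 6 →
        (∀ j < k, ¬ ((f :: fs).any (fun x => pvC (PySem.Str.lower x) j) = true)) →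
        ((f :: fs).any (fun x => pvC (PySem.Str.lower x) k) = true) →
        fs.foldl (fun acc x => Nat.min acc (pvFieldRank x)) (pvFieldRank f) = k := by
      intro k hk hfalse htrue
      obtain ⟨x, hx, hcx⟩ := List.any_eq_true.mp htrue
      have hge : ∀ y ∈ f :: fs, k ≤ pvFieldRank y := fun y hy =>
        pvFieldRank_ge (by omega) (fun j hj => hf j (hfalse j hj) y hy)
      have hxk : pvFieldRank x = k :=
        pvFieldRank_eq hk (fun j hj => hf j (hfalse j hj) x hx) hcx
      refine pv_foldl_min_eq (hge f List.mem_cons_self)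
        (fun y hy => hge y (List.mem_cons_of_mem _ hy)) ?_
      rcases List.mem_cons.mp hx with rfl | hx'
      · left; exact hxk
      · right; exact ⟨x, hx', hxk⟩
    split_ifs with h0 h1 h2 h3 h4 h5
    · rw [key 0 (by omega) (fun j hj => absurd hj (by omega)) h0]; rfl
    · rw [key 1 (by omega) (fun j hj => by interval_cases j; exacts [h0]) h1]; rfl
    · rw [key 2 (by omega) (fun j hj => by interval_cases j; exacts [h0, h1]) h2]; rfl
    · rw [key 3 (by omega) (fun j hj => by interval_cases j; exacts [h0, h1, h2]) h3]; rfl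
    · rw [key 4 (by omega) (fun j hj => by interval_cases j; exacts [h0, h1, h2, h3]) h4]; rfl
    · rw [key 5 (by omega) (fun j hj => by interval_cases j; exacts [h0, h1, h2, h3, h4]) h5]; rfl
    · have hge : ∀ y ∈ f :: fs, 6 ≤ pvFieldRank y := by
        intro y hy
        refine pvFieldRank_ge le_rfl (fun j hj => ?_)
        interval_cases j
        · exact hf 0 h0 y hy
        · exact hf 1 h1 y hy
        · exact hf 2 h2 y hy
        · exact hf 3 h3 y hy
        · exact hf 4 h4 y hy
        · exact hf 5 h5 y hy
      have h6 : pvFieldRank f = 6 :=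
        le_antisymm (pvFieldRank_le_six f) (hge f List.mem_cons_self)
      rw [pv_foldl_min_eq (le_of_eq h6.symm)
        (fun y hy => hge y (List.mem_cons_of_mem _ hy)) (Or.inl h6)]
      rfl
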